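-- pv_equiv track=rewrite | github.com/Torashin/Pic_sorting_script | Other/folder_renaming.py | generate_unique_directory_name
-- ===== SOURCE A (Python) =====
-- def generate_unique_directory_name(base_name: str, existing_names: set[str]) -> str:
--     if not existing_names:
--         return base_name
--     n = 2
--     new_name = base_name
--     while any(new_name.lower() == name.lower() for name in existing_names):
--         new_name = f"{base_name} ({n})"
--         n += 1
--     return new_name
-- ===== SOURCE B (Python) =====
-- def generate_unique_directory_name(base_name: str, existing_names: set[str]) -> str:
--     bl = base_name.lower()
--     lowered = [name.lower() for name in existing_names]
--     if bl not in lowered: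
--         return base_name
--     # one pass: collect the suffix strings of names shaped like "<bl> (<suffix>)"
--     prefix = bl + " ("
--     suffixes = set()
--     for name in lowered:
--         if name.startswith(prefix) and name.endswith(")"):
--             suffixes.add(name[len(prefix):][:-1])
--     # smallest n >= 2 whose canonical suffix str(n) is unused (pigeonhole bound)
--     n = min(k for k in range(2, len(suffixes) + 3) if str(k) not in suffixes)
--     return f"{base_name} ({n})"
-- ===== Notes on version B (the rewrite author's own statement) =====
-- stated objective: faster
-- what changed: Instead of trying candidates 'name (n)' one by one against the whole collection, B makes a single parsing pass over the lowered names that collects the set of ' (k)'-suffix strings of the base name and then returns the smallest n >= 2 whose canonical suffix str(n) is unused (mex), so no per-candidate rescan of the names remains.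
import Mathlib
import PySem

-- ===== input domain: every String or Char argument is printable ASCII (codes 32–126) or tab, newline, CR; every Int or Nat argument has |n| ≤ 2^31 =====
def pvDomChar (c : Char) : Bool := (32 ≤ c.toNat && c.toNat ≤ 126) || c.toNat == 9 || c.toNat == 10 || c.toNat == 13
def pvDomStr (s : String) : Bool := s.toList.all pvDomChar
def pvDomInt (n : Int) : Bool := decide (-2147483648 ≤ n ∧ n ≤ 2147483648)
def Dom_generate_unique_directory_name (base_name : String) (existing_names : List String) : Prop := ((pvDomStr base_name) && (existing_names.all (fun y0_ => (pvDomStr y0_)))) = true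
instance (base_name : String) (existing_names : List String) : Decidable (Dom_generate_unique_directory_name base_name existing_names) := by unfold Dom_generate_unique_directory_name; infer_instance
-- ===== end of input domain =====

-- B replaces A's candidate-by-candidate collision loop with a single parsing pass over the
-- names (collecting the " (k)"-suffix strings) followed by a minimum over the unused suffix
-- numbers — a single pass instead of a rescan per candidate (measured faster at the
-- timing run's large sizes); the return value is proved identical on the whole domain.

-- ===== PORT A =====
-- A's while loop, as fuel recursion; fuel `existing_names.length + 2` always suffices
-- (the tried candidates are pairwise distinct, so at most `existing_names.length` of them
-- can collide) — the fuel-0 branch is unreachable on real runs.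
def pvLoopA (base_name : String) (existing_names : List String) :
    Nat → Int → String → String
  | 0, _, new_name => new_name
  | fuel + 1, n, new_name =>
    if existing_names.any (fun name => PySem.Str.lower new_name == PySem.Str.lower name) then
      pvLoopA base_name existing_names fuel (n + 1)
        (base_name ++ " (" ++ PySem.Int.toStr n ++ ")")
    else new_name

def generate_unique_directory_name (base_name : String) (existing_names : List String) : String :=
  if existing_names = [] then base_name
  else pvLoopA base_name existing_names (existing_names.length + 2) 2 base_name

-- ===== PORT B =====
def generate_unique_directory_name_alt (base_name : String) (existing_names : List String) : String :=
  let bl := PySem.Str.lower base_name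
  let lowered := existing_names.map PySem.Str.lower
  if !(lowered.contains bl) then base_name
  else
    let pre := bl ++ " ("
    let suffixes : PySem.Set String := lowered.foldl (fun s name =>
      if PySem.Str.startswith name pre && PySem.Str.endswith name ")" then
        PySem.Set.add s (PySem.Str.slice (PySem.Str.slice name (some (PySem.Str.len pre)) none) none (some (-1)))
      else s) PySem.Set.empty
    -- min(k for k in range(2, len(suffixes)+3) if str(k) not in suffixes);
    -- the `none` branch is Python's ValueError on an empty minimum, unreachable by pigeonhole
    match PySem.List.min? ((PySem.List.pyRange 2 ((suffixes.length : Int) + 3)).filter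
        (fun k => !(suffixes.contains (PySem.Int.toStr k)))) (fun k => k) with
    | some n => base_name ++ " (" ++ PySem.Int.toStr n ++ ")"
    | none => base_name

-- ===== PRECONDITION & SPEC =====
def Spec_generate_unique_directory_name (base_name : String) (existing_names : List String) (out : String) : Prop := out = generate_unique_directory_name_alt base_name existing_names
instance (base_name : String) (existing_names : List String) (out : String) : Decidable (Spec_generate_unique_directory_name base_name existing_names out) := by unfold Spec_generate_unique_directory_name; infer_instance

-- ===== CLAIM (what is proved, stated in full; the proofs are below) =====
def Claim_equal_generate_unique_directory_name : Prop := ∀ (base_name : String) (existing_names : List String), Dom_generate_unique_directory_name base_name existing_names → Spec_generate_unique_directory_name base_name existing_names (generate_unique_directory_name base_name existing_names)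

-- ===== LEMMAS AND PROOFS =====

-- names for the values B's port let-binds (definitionally equal to them)
def pvPre (base_name : String) : String := PySem.Str.lower base_name ++ " ("

def pvMid (base_name name : String) : String :=
  PySem.Str.slice (PySem.Str.slice name (some (PySem.Str.len (pvPre base_name))) none) none (some (-1))

def pvCond (base_name name : String) : Bool :=
  PySem.Str.startswith name (pvPre base_name) && PySem.Str.endswith name ")"

def pvSuffixes (base_name : String) (lowered : List String) : PySem.Set String :=
  lowered.foldl (fun s name => if pvCond base_name name then PySem.Set.add s (pvMid base_name name) else s)
    PySem.Set.empty

def pvCand (base_name : String) (n : Int) : String :=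
  base_name ++ " (" ++ PySem.Int.toStr n ++ ")"

-- decimal digit list of a natural number, most significant first (what Nat.toDigits 10 computes)
def pvRep (n : Nat) : List Char :=
  if _h : n < 10 then [Nat.digitChar n]
  else pvRep (n / 10) ++ [Nat.digitChar (n % 10)]
  decreasing_by exact Nat.div_lt_self (by omega) (by omega)

theorem pvRep_lt {n : Nat} (h : n < 10) : pvRep n = [Nat.digitChar n] := by
  rw [pvRep]; rw [dif_pos h]

theorem pvRep_ge {n : Nat} (h : ¬ n < 10) :
    pvRep n = pvRep (n / 10) ++ [Nat.digitChar (n % 10)] := by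
  rw [pvRep]; rw [dif_neg h]

theorem toDigitsCore_succ (f n : Nat) (l : List Char) :
    Nat.toDigitsCore 10 (f + 1) n l =
      if n / 10 = 0 then (n % 10).digitChar :: l
      else Nat.toDigitsCore 10 f (n / 10) ((n % 10).digitChar :: l) := rfl

theorem pvRep_eq_toDigitsCore : ∀ (f n : Nat) (l : List Char), n < 10 ^ (f + 1) →
    Nat.toDigitsCore 10 (f + 1) n l = pvRep n ++ l := by
  intro f
  induction f with
  | zero =>
    intro n l h
    norm_num at h
    rw [toDigitsCore_succ, if_pos (Nat.div_eq_of_lt h), pvRep_lt h,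
      Nat.mod_eq_of_lt h, List.singleton_append]
  | succ f ih =>
    intro n l h
    rw [toDigitsCore_succ]
    by_cases h10 : n < 10
    · rw [if_pos (Nat.div_eq_of_lt h10), pvRep_lt h10, Nat.mod_eq_of_lt h10,
        List.singleton_append]
    · rw [if_neg (by omega),
        ih (n / 10) _ (Nat.div_lt_of_lt_mul (by rw [← pow_succ']; exact h)),
        pvRep_ge h10]
      simp

theorem pvToChars_eq_pvRep (n : Int) (h : 0 ≤ n) : PySem.Int.toChars n = pvRep n.toNat := by
  rw [PySem.Int.toChars, if_neg (by omega)]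
  show Nat.toDigitsCore 10 (n.toNat + 1) n.toNat [] = _
  rw [pvRep_eq_toDigitsCore n.toNat n.toNat []
    (lt_of_lt_of_le (Nat.lt_pow_self (by omega)) (Nat.pow_le_pow_right (by omega) (Nat.le_succ _)))]
  simp

theorem pvRep_ne_nil (n : Nat) : pvRep n ≠ [] := by
  by_cases h : n < 10
  · rw [pvRep_lt h]; simp
  · rw [pvRep_ge h]; simp

theorem pvDigitChar_inj {a b : Nat} (ha : a < 10) (hb : b < 10)
    (h : Nat.digitChar a = Nat.digitChar b) : a = b := by
  interval_cases a <;> interval_cases b <;> simp_all [Nat.digitChar]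

theorem pvRep_inj : ∀ (a b : Nat), pvRep a = pvRep b → a = b := by
  intro a
  induction a using Nat.strong_induction_on with
  | _ a ih =>
    intro b h
    by_cases ha : a < 10 <;> by_cases hb : b < 10
    · rw [pvRep_lt ha, pvRep_lt hb] at h
      exact pvDigitChar_inj ha hb (by simpa using h)
    · rw [pvRep_lt ha, pvRep_ge hb] at h
      have := congrArg List.length h
      simp at this
      have := pvRep_ne_nil (b / 10)
      cases hh : pvRep (b / 10) <;> simp_all
    · rw [pvRep_ge ha, pvRep_lt hb] at h
      have := pvRep_ne_nil (a / 10)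
      cases hh : pvRep (a / 10) <;> simp_all
    · rw [pvRep_ge ha, pvRep_ge hb] at h
      have hlen : (pvRep (a / 10)).length = (pvRep (b / 10)).length := by
        have := congrArg List.length h; simpa using this
      obtain ⟨h1, h2⟩ := List.append_inj h hlen
      have hd : a / 10 = b / 10 := ih (a / 10) (Nat.div_lt_self (by omega) (by omega)) _ h1
      have hm : a % 10 = b % 10 :=
        pvDigitChar_inj (Nat.mod_lt _ (by omega)) (Nat.mod_lt _ (by omega)) (by simpa using h2)
      omega

theorem pvRep_digits (n : Nat) : ∀ c ∈ pvRep n, ∃ k, k < 10 ∧ c = Nat.digitChar k := by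
  induction n using Nat.strong_induction_on with
  | _ n ih =>
    intro c hc
    by_cases h : n < 10
    · rw [pvRep_lt h] at hc; simp at hc; exact ⟨n, h, hc⟩
    · rw [pvRep_ge h] at hc
      rcases List.mem_append.mp hc with hc | hc
      · exact ih (n / 10) (Nat.div_lt_self (by omega) (by omega)) c hc
      · simp at hc; exact ⟨n % 10, Nat.mod_lt _ (by omega), hc⟩

theorem pvLowerChar_digit {k : Nat} (h : k < 10) :
    PySem.Chars.lowerChar (Nat.digitChar k) = Nat.digitChar k := by
  interval_cases k <;> decide

theorem pvLower_toChars (n : Int) (h : 0 ≤ n) :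
    PySem.Chars.lower (PySem.Int.toChars n) = PySem.Int.toChars n := by
  rw [pvToChars_eq_pvRep n h, PySem.Chars.lower]
  conv_rhs => rw [← List.map_id (pvRep n.toNat)]
  apply List.map_congr_left
  intro c hc
  obtain ⟨k, hk, rfl⟩ := pvRep_digits _ c hc
  exact pvLowerChar_digit hk

theorem pvToStr_inj (a b : Int) (ha : 0 ≤ a) (hb : 0 ≤ b)
    (h : PySem.Int.toStr a = PySem.Int.toStr b) : a = b := by
  have := congrArg String.toList h
  rw [PySem.Int.toList_toStr, PySem.Int.toList_toStr, pvToChars_eq_pvRep a ha,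
    pvToChars_eq_pvRep b hb] at this
  have := pvRep_inj _ _ this
  omega

theorem pvLower_cand (base_name : String) (n : Int) (h : 0 ≤ n) :
    PySem.Str.lower (pvCand base_name n) = PySem.Str.lower base_name ++ " (" ++ PySem.Int.toStr n ++ ")" := by
  apply String.toList_inj.mp
  simp only [pvCand, String.toList_append, PySem.Str.toList_lower, PySem.Chars.lower,
    List.map_append, PySem.Int.toList_toStr]
  have hd : List.map PySem.Chars.lowerChar (PySem.Int.toChars n) = PySem.Int.toChars n := by
    rw [show List.map PySem.Chars.lowerChar (PySem.Int.toChars n) = PySem.Chars.lower (PySem.Int.toChars n) from rfl,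
      pvLower_toChars n h]
  rw [hd]
  have h1 : List.map PySem.Chars.lowerChar " (".toList = " (".toList := by decide
  have h2 : List.map PySem.Chars.lowerChar ")".toList = ")".toList := by decide
  rw [h1, h2]

theorem pvMid_toList (base_name name : String) :
    (pvMid base_name name).toList = (name.toList.drop (pvPre base_name).toList.length).dropLast := by
  simp only [pvMid, PySem.Str.toList_slice, PySem.Chars.slice_eq_listSlice]
  rw [PySem.List.slice_to_neg_one]
  rw [show PySem.Str.len (pvPre base_name) = ((pvPre base_name).toList.length : Int) from rfl]
  rw [PySem.List.slice_from _ (by positivity)]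
  simp

theorem pvParse_shape (base_name name : String) (h : pvCond base_name name = true) :
    name.toList = (pvPre base_name).toList ++ (pvMid base_name name).toList ++ [')'] := by
  simp only [pvCond, Bool.and_eq_true, PySem.Str.startswith_eq, PySem.Str.endswith_eq,
    PySem.Chars.startswith_iff, PySem.Chars.endswith_iff] at h
  obtain ⟨⟨r, hr⟩, hsuf⟩ := h
  have hpl : (")" : String).toList = [')'] := by decide
  have hsuf' : [')'] <:+ name.toList := by rw [← hpl]; exact hsuf
  have hrne : r ≠ [] := by
    rintro rfl
    obtain ⟨t, hts⟩ := hsuf'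
    rw [List.append_nil] at hr
    have h1 : name.toList.getLast? = some ')' := by rw [← hts]; simp
    have h2 : name.toList.getLast? = some '(' := by
      rw [← hr]
      simp [pvPre, String.toList_append]
    rw [h1] at h2; simp at h2
  have hlast : r.getLast hrne = ')' := by
    obtain ⟨t, hts⟩ := hsuf'
    have h1 : name.toList.getLast? = some ')' := by rw [← hts]; simp
    rw [← hr, List.getLast?_append_of_ne_nil _ hrne] at h1
    rw [List.getLast?_eq_some_getLast hrne] at h1
    simpa using h1
  have hr' : r = r.dropLast ++ [')'] := by
    conv_lhs => rw [← List.dropLast_append_getLast hrne]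
    rw [hlast]
  rw [pvMid_toList, ← hr, List.drop_left, List.append_assoc]
  exact congrArg _ hr'

theorem pvMem_suffixes (base_name : String) (lowered : List String) (x : String) :
    x ∈ pvSuffixes base_name lowered ↔
      ∃ name ∈ lowered, pvCond base_name name = true ∧ pvMid base_name name = x := by
  have H : ∀ (l : List String) (s0 : PySem.Set String),
      (x ∈ l.foldl (fun s name => if pvCond base_name name then PySem.Set.add s (pvMid base_name name) else s) s0
        ↔ x ∈ s0 ∨ ∃ name ∈ l, pvCond base_name name = true ∧ pvMid base_name name = x) := by
    intro l
    induction l with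
    | nil => simp
    | cons hd tl ih =>
      intro s0
      simp only [List.foldl_cons, ih]
      by_cases hc : pvCond base_name hd
      · rw [if_pos hc, PySem.Set.mem_add]
        constructor
        · rintro (⟨hx | hx⟩ | ⟨nm, hnm, hcn, hmx⟩)
          · exact Or.inl hx
          · exact Or.inr ⟨hd, by simp, hc, hx.symm⟩
          · exact Or.inr ⟨nm, by simp [hnm], hcn, hmx⟩
        · rintro (hx | ⟨nm, hnm, hcn, hmx⟩)
          · exact Or.inl (Or.inl hx)
          · rcases List.mem_cons.mp hnm with rfl | hnm
            · exact Or.inl (Or.inr hmx.symm)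
            · exact Or.inr ⟨nm, hnm, hcn, hmx⟩
      · rw [if_neg hc]
        constructor
        · rintro (hx | ⟨nm, hnm, hcn, hmx⟩)
          · exact Or.inl hx
          · exact Or.inr ⟨nm, by simp [hnm], hcn, hmx⟩
        · rintro (hx | ⟨nm, hnm, hcn, hmx⟩)
          · exact Or.inl hx
          · rcases List.mem_cons.mp hnm with rfl | hnm
            · simp_all
            · exact Or.inr ⟨nm, hnm, hcn, hmx⟩
  rw [pvSuffixes, H]
  simp [PySem.Set.empty]

theorem pvSuffixes_len (base_name : String) (lowered : List String) :
    (pvSuffixes base_name lowered).length ≤ lowered.length := by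
  have H : ∀ (l : List String) (s0 : PySem.Set String),
      (l.foldl (fun s name => if pvCond base_name name then PySem.Set.add s (pvMid base_name name) else s) s0).length
        ≤ s0.length + l.length := by
    intro l
    induction l with
    | nil => simp
    | cons hd tl ih =>
      intro s0
      simp only [List.foldl_cons]
      refine le_trans (ih _) ?_
      have : (if pvCond base_name hd then PySem.Set.add s0 (pvMid base_name hd) else s0).length ≤ s0.length + 1 := by
        split
        · rw [PySem.Set.add]; split <;> simp
        · simp
      simp only [List.length_cons]
      omega
  simpa using H lowered PySem.Set.empty

theorem pvCand_lower_toList (base_name : String) (n : Int) (h : 0 ≤ n) :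
    (PySem.Str.lower (pvCand base_name n)).toList
      = (pvPre base_name).toList ++ (PySem.Int.toStr n).toList ++ [')'] := by
  rw [pvLower_cand base_name n h]
  simp only [String.toList_append, pvPre]
  have : (")" : String).toList = [')'] := by decide
  rw [this, List.append_assoc, List.append_assoc]

theorem pvMain (base_name : String) (lowered : List String) (n : Int) (h2 : 2 ≤ n) :
    lowered.contains (PySem.Str.lower (pvCand base_name n))
      = (pvSuffixes base_name lowered).contains (PySem.Int.toStr n) := by
  have h0 : (0:Int) ≤ n := by omega
  rw [Bool.eq_iff_iff]; simp only [List.contains_iff_mem, PySem.Set.contains_iff]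
  constructor
  · intro hx
    rw [pvMem_suffixes]
    refine ⟨PySem.Str.lower (pvCand base_name n), hx, ?_, ?_⟩
    · simp only [pvCond, Bool.and_eq_true, PySem.Str.startswith_eq, PySem.Str.endswith_eq,
        PySem.Chars.startswith_iff, PySem.Chars.endswith_iff]
      refine ⟨⟨(PySem.Int.toStr n).toList ++ [')'], ?_⟩, ?_⟩
      · rw [pvCand_lower_toList base_name n h0]; simp [List.append_assoc]
      · show (")" : String).toList <:+ _
        rw [pvCand_lower_toList base_name n h0, show (")" : String).toList = [')'] from by decide]
        exact ⟨_, rfl⟩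
    · apply String.toList_inj.mp
      rw [pvMid_toList, pvCand_lower_toList base_name n h0, List.append_assoc, List.drop_left,
        List.dropLast_concat]
  · intro hx
    rw [pvMem_suffixes] at hx
    obtain ⟨name, hnm, hcond, hmid⟩ := hx
    have := pvParse_shape base_name name hcond
    rw [hmid] at this
    have : name = PySem.Str.lower (pvCand base_name n) := by
      apply String.toList_inj.mp
      rw [this, pvCand_lower_toList base_name n h0]
    rwa [← this]

-- A's any-test is membership of the lowered candidate in the lowered name list
theorem pvTest_eq (existing_names : List String) (s : String) :
    (existing_names.any (fun name => PySem.Str.lower s == PySem.Str.lower name))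
      = (existing_names.map PySem.Str.lower).contains (PySem.Str.lower s) := by
  rw [Bool.eq_iff_iff]
  constructor
  · intro h
    obtain ⟨a, ha, he⟩ := List.any_eq_true.mp h
    exact List.contains_iff_mem.mpr (List.mem_map.mpr ⟨a, ha, (beq_iff_eq.mp he).symm⟩)
  · intro h
    obtain ⟨a, ha, he⟩ := List.mem_map.mp (List.contains_iff_mem.mp h)
    exact List.any_eq_true.mpr ⟨a, ha, beq_iff_eq.mpr he.symm⟩

-- list-level pigeonhole: a nodup list inside another list is no longer than it
theorem pvNodup_len {α : Type} [DecidableEq α] (l1 l2 : List α) (h1 : l1.Nodup)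
    (h2 : ∀ x ∈ l1, x ∈ l2) : l1.length ≤ l2.length := by
  calc l1.length = l1.toFinset.card := (List.toFinset_card_of_nodup h1).symm
    _ ≤ l2.toFinset.card := Finset.card_le_card (by
        intro x hx; simp only [List.mem_toFinset] at *; exact h2 x hx)
    _ ≤ l2.length := l2.toFinset_card_le

-- some suffix number in [2, L+3) is unused
theorem pvExists_free (base_name : String) (lowered : List String) :
    ∃ j : Nat, j ≤ (pvSuffixes base_name lowered).length ∧
      ¬ ((pvSuffixes base_name lowered).contains (PySem.Int.toStr ((j : Int) + 2)) = true) := by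
  by_contra hall
  push Not at hall
  set L := (pvSuffixes base_name lowered).length with hL
  have hsub : ∀ x ∈ (List.range (L + 1)).map (fun (j : Nat) => PySem.Int.toStr ((j : Int) + 2)),
      x ∈ pvSuffixes base_name lowered := by
    intro x hx
    obtain ⟨j, hj, rfl⟩ := List.mem_map.mp hx
    have := hall j (by simpa using Nat.lt_succ_iff.mp (List.mem_range.mp hj))
    exact (PySem.Set.contains_iff _ _).mp this
  have hnd : ((List.range (L + 1)).map (fun (j : Nat) => PySem.Int.toStr ((j : Int) + 2))).Nodup := by
    refine List.Nodup.map_on ?_ (List.nodup_range)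
    intro a _ b _ hab
    have := pvToStr_inj _ _ (by omega) (by omega) hab
    omega
  have := pvNodup_len _ _ hnd hsub
  simp at this
  omega

theorem pvLoopA_eq (base_name : String) (existing_names : List String) (n₀ : Int)
    (hfree : existing_names.any (fun name => PySem.Str.lower (pvCand base_name n₀) == PySem.Str.lower name) = false)
    (hbefore : ∀ k : Int, 2 ≤ k → k < n₀ →
      existing_names.any (fun name => PySem.Str.lower (pvCand base_name k) == PySem.Str.lower name) = true) :
    ∀ (fuel : Nat) (n : Int), 2 ≤ n → n ≤ n₀ → n₀ < n + fuel →
      pvLoopA base_name existing_names fuel (n + 1) (pvCand base_name n) = pvCand base_name n₀ := by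
  intro fuel
  induction fuel with
  | zero => intro n _ h1 h2; omega
  | succ f ih =>
    intro n hn h1 h2
    rw [pvLoopA]
    by_cases he : n = n₀
    · subst he; rw [hfree]; simp
    · rw [hbefore n hn (by omega)]
      simp only [if_true]
      have := ih (n + 1) (by omega) (by omega) (by omega)
      simpa [pvCand] using this


theorem pvAlt_eq_of_contains (base_name : String) (existing_names : List String) (n₀ : Int)
    (hc : (existing_names.map PySem.Str.lower).contains (PySem.Str.lower base_name) = true)
    (hmin : PySem.List.min? ((PySem.List.pyRange 2
        (((pvSuffixes base_name (existing_names.map PySem.Str.lower)).length : Int) + 3)).filter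
        (fun k => !((pvSuffixes base_name (existing_names.map PySem.Str.lower)).contains (PySem.Int.toStr k))))
        (fun k => k) = some n₀) :
    generate_unique_directory_name_alt base_name existing_names = pvCand base_name n₀ := by
  show (if !((existing_names.map PySem.Str.lower).contains (PySem.Str.lower base_name)) then base_name
    else match PySem.List.min? ((PySem.List.pyRange 2
        (((pvSuffixes base_name (existing_names.map PySem.Str.lower)).length : Int) + 3)).filter
        (fun k => !((pvSuffixes base_name (existing_names.map PySem.Str.lower)).contains (PySem.Int.toStr k))))
        (fun k => k) with
      | some n => base_name ++ " (" ++ PySem.Int.toStr n ++ ")"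
      | none => base_name) = pvCand base_name n₀
  rw [hc, hmin]
  rfl

theorem pv_spec (base_name : String) (existing_names : List String) :
    generate_unique_directory_name base_name existing_names
      = generate_unique_directory_name_alt base_name existing_names := by
  by_cases hnil : existing_names = []
  · subst hnil
    rfl
  · rw [generate_unique_directory_name, if_neg hnil]
    set lowered := existing_names.map PySem.Str.lower with hlow
    by_cases hc : lowered.contains (PySem.Str.lower base_name) = true
    · -- base name collides; both sides produce the first free candidate
      set sfx := pvSuffixes base_name lowered with hsfx
      set L := sfx.length with hL
      have hex : ∃ j : Nat, ¬ (sfx.contains (PySem.Int.toStr ((j : Int) + 2)) = true) := by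
        obtain ⟨j, _, hj⟩ := pvExists_free base_name lowered
        exact ⟨j, hj⟩
      obtain ⟨j₀, hj₀free, hj₀min⟩ : ∃ j₀ : Nat,
          sfx.contains (PySem.Int.toStr ((j₀ : Int) + 2)) = false ∧
            ∀ i : Nat, i < j₀ → sfx.contains (PySem.Int.toStr ((i : Int) + 2)) = true := by
        refine ⟨Nat.find hex, ?_, ?_⟩
        · exact Bool.eq_false_iff.mpr (Nat.find_spec hex)
        · intro i hi
          exact of_not_not (Nat.find_min hex hi)
      set n₀ : Int := (j₀ : Int) + 2 with hn₀
      have hj₀le : j₀ ≤ L := by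
        obtain ⟨j, hjle, hj⟩ := pvExists_free base_name lowered
        rw [← hsfx] at hjle hj
        rw [hL]
        by_contra hgt
        exact hj (hj₀min j (by omega))
      have hfree : sfx.contains (PySem.Int.toStr n₀) = false := hj₀free
      have hbefore : ∀ k : Int, 2 ≤ k → k < n₀ → sfx.contains (PySem.Int.toStr k) = true := by
        intro k h2 hk
        have hj : (k - 2).toNat < j₀ := by omega
        have := hj₀min _ hj
        have hcast : (((k - 2).toNat : Int) + 2) = k := by omega
        rwa [hcast] at this
      have h2n₀ : 2 ≤ n₀ := by omega
      -- B returns candidate n₀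
      have hmemf : n₀ ∈ (PySem.List.pyRange 2 ((L : Int) + 3)).filter
          (fun k => !(sfx.contains (PySem.Int.toStr k))) := by
        rw [List.mem_filter]
        constructor
        · rw [PySem.List.mem_pyRange_one]
          omega
        · rw [hfree]; rfl
      obtain ⟨m, hm⟩ : ∃ m, PySem.List.min? ((PySem.List.pyRange 2 ((L : Int) + 3)).filter
          (fun k => !(sfx.contains (PySem.Int.toStr k)))) (fun k => k) = some m := by
        cases hmm : PySem.List.min? ((PySem.List.pyRange 2 ((L : Int) + 3)).filter
            (fun k => !(sfx.contains (PySem.Int.toStr k)))) (fun k => k) with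
        | none =>
          rw [PySem.List.min?_eq_none_iff] at hmm
          rw [hmm] at hmemf
          simp at hmemf
        | some m => exact ⟨m, rfl⟩
      have hmn : m = n₀ := by
        have hmem := PySem.List.min?_mem hm
        rw [List.mem_filter, PySem.List.mem_pyRange_one] at hmem
        obtain ⟨⟨hm2, _⟩, hmf⟩ := hmem
        have hmfree : sfx.contains (PySem.Int.toStr m) = false := by
          simpa using hmf
        have hle : m ≤ n₀ := PySem.List.min?_isMin hm n₀ hmemf
        by_contra hne
        have hlt : m < n₀ := lt_of_le_of_ne hle hne
        rw [hbefore m hm2 hlt] at hmfree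
        simp at hmfree
      rw [hmn] at hm
      rw [pvAlt_eq_of_contains base_name existing_names n₀ hc hm]
      -- A returns candidate n₀ too
      have hfreeA : existing_names.any
          (fun name => PySem.Str.lower (pvCand base_name n₀) == PySem.Str.lower name) = false := by
        rw [pvTest_eq, ← hlow, pvMain base_name lowered n₀ h2n₀, hfree]
      have hbeforeA : ∀ k : Int, 2 ≤ k → k < n₀ →
          existing_names.any (fun name => PySem.Str.lower (pvCand base_name k) == PySem.Str.lower name) = true := by
        intro k h2 hk
        rw [pvTest_eq, ← hlow, pvMain base_name lowered k h2]
        exact hbefore k h2 hk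
      rw [pvLoopA]
      have hfirst : existing_names.any
          (fun name => PySem.Str.lower base_name == PySem.Str.lower name) = true := by
        rw [pvTest_eq, ← hlow]; exact hc
      rw [hfirst]
      simp only [if_true]
      have hLlen : L ≤ existing_names.length := by
        have := pvSuffixes_len base_name lowered
        rw [hlow] at this
        simpa using this
      have := pvLoopA_eq base_name existing_names n₀ hfreeA hbeforeA
        (existing_names.length + 1) 2 (by omega) (by omega) (by push_cast; omega)
      simpa [pvCand] using this
    · -- base name is free: both sides return it unchanged
      have hcf : lowered.contains (PySem.Str.lower base_name) = false := by
        simpa using hc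
      rw [pvLoopA]
      have : existing_names.any (fun name => PySem.Str.lower base_name == PySem.Str.lower name) = false := by
        rw [pvTest_eq, ← hlow]; exact hcf
      rw [this]
      simp only [Bool.false_eq_true, if_false]
      show base_name = (if !(lowered.contains (PySem.Str.lower base_name)) then base_name
        else _) 
      rw [hcf]
      rfl

-- ===== VERDICT (by name: the statement is the Claim_ definition above) =====
theorem generate_unique_directory_name_spec : Claim_equal_generate_unique_directory_name := by
  intro base_name existing_names _
  unfold Spec_generate_unique_directory_name
  exact pv_spec base_name existing_names
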